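-- pv_equiv track=rewrite | github.com/nc3man/switrs | ccrs_filter.py | get_crashes
-- ===== SOURCE A (Python) =====
-- from collections import defaultdict
--
-- def get_crashes(crashes, crash_keys, city_name):
--     crashes_trim = defaultdict(list)
--     collision_ids = []
--     ncrashes = len(crashes['Collision Id'])
--
--     # trim large dataset down to desired city
--     for n in range(ncrashes):
--         if crashes["City Name"][n] == city_name:
--             collision_ids.append(crashes['Collision Id'][n])
--             for key in crash_keys:
--                 crashes_trim[key].append(crashes[key][n])
--
--     return crashes_trim, collision_ids
-- ===== SOURCE B (Python) =====
-- from collections import defaultdict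
--
-- def get_crashes(crashes, crash_keys, city_name):
--     # gather each matching row once as a tuple (values for crash_keys, then the id),
--     # then transpose the matched rows with a single zip(*) and assign whole columns
--     ncrashes = len(crashes['Collision Id'])
--     matched = [tuple(crashes[key][n] for key in crash_keys) + (crashes['Collision Id'][n],)
--                for n in range(ncrashes) if crashes["City Name"][n] == city_name]
--     crashes_trim = defaultdict(list)
--     if not matched:
--         return crashes_trim, []
--     cols = list(zip(*matched))
--     for key, col in zip(crash_keys, cols):
--         crashes_trim[key] = list(col)
--     collision_ids = list(cols[-1])
--     return crashes_trim, collision_ids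
-- ===== Notes on version B (the rewrite author's own statement) =====
-- stated objective: alternative
-- what changed: A interleaves one row-wise pass that appends to every per-key column list as it goes; B gathers the matching rows as tuples, transposes them once with zip(*), and then assigns each trimmed column (and the id column) wholesale.
import Mathlib
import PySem

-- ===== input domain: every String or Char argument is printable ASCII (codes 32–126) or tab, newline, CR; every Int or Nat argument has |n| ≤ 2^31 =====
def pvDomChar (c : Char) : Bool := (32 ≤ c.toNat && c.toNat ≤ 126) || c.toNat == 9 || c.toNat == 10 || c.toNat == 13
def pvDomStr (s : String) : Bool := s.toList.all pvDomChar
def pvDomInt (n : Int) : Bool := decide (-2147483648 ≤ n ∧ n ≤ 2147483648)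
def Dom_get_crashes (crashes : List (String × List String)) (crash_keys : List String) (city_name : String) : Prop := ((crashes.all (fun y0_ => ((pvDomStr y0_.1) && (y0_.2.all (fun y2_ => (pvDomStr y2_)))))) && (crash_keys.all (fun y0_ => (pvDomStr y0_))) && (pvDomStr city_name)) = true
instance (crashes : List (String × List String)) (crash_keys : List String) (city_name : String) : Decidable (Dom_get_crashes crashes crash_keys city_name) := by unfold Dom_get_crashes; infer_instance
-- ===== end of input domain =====

-- B replaces A's interleaved row pass (append to every per-key column per matching row) by
-- gathering the matching rows as tuples and transposing them once: same value on Pre_.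

-- ===== PORT A =====
-- row loop with a defaultdict(list): crashes_trim[key].append(v) is Dict.modify key [] (· ++ [v])
def get_crashes (crashes : List (String × List String)) (crash_keys : List String) (city_name : String) : (List (String × List String)) × List String :=
  let d : PySem.Dict String (List String) := PySem.Dict.mk crashes
  let st := (List.range (d.getD "Collision Id" []).length).foldl
    (fun (st : PySem.Dict String (List String) × List String) n =>
      if (d.getD "City Name" []).getD n "" == city_name then
        (crash_keys.foldl (fun t key => t.modify key [] (· ++ [(d.getD key []).getD n ""])) st.1,
         st.2 ++ [(d.getD "Collision Id" []).getD n ""])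
      else st)
    (PySem.Dict.empty, [])
  (st.1.items, st.2)

-- ===== PORT B =====
def get_crashes_alt (crashes : List (String × List String)) (crash_keys : List String) (city_name : String) : (List (String × List String)) × List String :=
  let d : PySem.Dict String (List String) := PySem.Dict.mk crashes
  let k := crash_keys.length
  -- matched rows: the tuple (values for crash_keys, then the collision id), one per matching n
  let matched : List (List String) :=
    ((List.range (d.getD "Collision Id" []).length).filter
      (fun n => (d.getD "City Name" []).getD n "" == city_name)).map
      (fun n => crash_keys.map (fun key => (d.getD key []).getD n "")
                ++ [(d.getD "Collision Id" []).getD n ""])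
  if matched.isEmpty then ((PySem.Dict.empty : PySem.Dict String (List String)).items, [])
  else
    -- zip(*matched): every row has length k+1, so it is exactly the transpose (column i row-wise)
    let cols : List (List String) := (List.range (k+1)).map (fun i => matched.map (fun row => row.getD i ""))
    -- for key, col in zip(crash_keys, cols): crashes_trim[key] = list(col)
    let trim := (crash_keys.zip cols).foldl
      (fun (t : PySem.Dict String (List String)) p => t.insert p.1 p.2) PySem.Dict.empty
    -- cols[-1]: cols has length k+1, so the negative index is exactly index k
    (trim.items, cols.getD k [])

-- ===== PRECONDITION & SPEC =====
-- Pre_ excludes (a) inputs where A raises (missing 'Collision Id'/'City Name' key, a column too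
-- short for an accessed row index, a crash_keys key absent from crashes) and (b) the defensible
-- corner of duplicate names in crash_keys when at least one row matches, where A's per-row double
-- append and B's whole-column reassignment are both defensible dict behaviours and differ.
def Pre_get_crashes (crashes : List (String × List String)) (crash_keys : List String) (city_name : String) : Prop :=
  let d : PySem.Dict String (List String) := PySem.Dict.mk crashes
  let idCol := d.getD "Collision Id" []
  let cityCol := d.getD "City Name" []
  d.contains "Collision Id" = true ∧
  (0 < idCol.length → d.contains "City Name" = true ∧ idCol.length ≤ cityCol.length) ∧
  (∀ n < idCol.length, cityCol.getD n "" = city_name →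
    crash_keys.Nodup ∧ ∀ k ∈ crash_keys, d.contains k = true ∧ n < (d.getD k []).length)
instance (crashes : List (String × List String)) (crash_keys : List String) (city_name : String) : Decidable (Pre_get_crashes crashes crash_keys city_name) := by unfold Pre_get_crashes; infer_instance

def pvWitness_get_crashes : (List (String × List String)) × List String × String :=
  ([("Collision Id", ["1", "2"]), ("City Name", ["sf", "la"]), ("a", ["v", "w"])], ["a"], "sf")

def Spec_get_crashes (crashes : List (String × List String)) (crash_keys : List String) (city_name : String) (out : (List (String × List String)) × List String) : Prop := out = get_crashes_alt crashes crash_keys city_name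
instance (crashes : List (String × List String)) (crash_keys : List String) (city_name : String) (out : (List (String × List String)) × List String) : Decidable (Spec_get_crashes crashes crash_keys city_name out) := by unfold Spec_get_crashes; infer_instance

-- ===== CLAIM (what is proved, stated in full; the proofs are below) =====
def Claim_equal_get_crashes : Prop := ∀ (crashes : List (String × List String)) (crash_keys : List String) (city_name : String), Dom_get_crashes crashes crash_keys city_name → Pre_get_crashes crashes crash_keys city_name → Spec_get_crashes crashes crash_keys city_name (get_crashes crashes crash_keys city_name)

-- ===== LEMMAS AND PROOFS =====

-- common normal form both ports are reduced to (proof helper only)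
def pvCanon (N : Nat) (p : Nat → Bool) (idv : Nat → String) (colv : String → Nat → String)
    (keys : List String) : (List (String × List String)) × List String :=
  ((if ((List.range N).filter p).isEmpty then (PySem.Dict.empty : PySem.Dict String (List String))
    else keys.foldl
      (fun t key => t.insert key (((List.range N).filter p).map (colv key))) PySem.Dict.empty).items,
   ((List.range N).filter p).map idv)

-- a loop that skips non-matching elements is a loop over the filtered list
theorem foldl_if_skip {α β : Type} (p : β → Bool) (f : α → β → α) (l : List β) (init : α) :
    l.foldl (fun s n => if p n then f s n else s) init = (l.filter p).foldl f init := by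
  induction l generalizing init with
  | nil => rfl
  | cons x xs ih =>
    by_cases h : p x <;> simp [List.foldl_cons, h, ih]

-- a fold whose step is itself a fold over g n is a fold over the flatMap
theorem foldl_foldl_eq_foldl_flatMap {α β γ : Type} (f : α → γ → α) (g : β → List γ)
    (l : List β) (init : α) :
    l.foldl (fun s n => (g n).foldl f s) init = (l.flatMap g).foldl f init := by
  induction l generalizing init with
  | nil => rfl
  | cons x xs ih => simp [List.foldl_cons, List.flatMap_cons, List.foldl_append, ih]

-- first-insertion dedup of a nonempty repetition of a duplicate-free list is that list
theorem ofList_flatMap_const {keys : List String} (hk : keys.Nodup)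
    {I : List ℕ} (hI : I ≠ []) :
    PySem.Set.ofList (I.flatMap (fun _ => keys)) = keys := by
  obtain ⟨n, J, rfl⟩ : ∃ n J, I = n :: J := by
    cases I with | nil => exact absurd rfl hI | cons a b => exact ⟨a, b, rfl⟩
  rw [List.flatMap_cons, PySem.Set.ofList_append, PySem.Set.ofList_eq_self_of_nodup keys hk,
      PySem.Set.update_eq_append_filter]
  have h0 : (PySem.Set.ofList (J.flatMap fun _ => keys)).filter
      (fun y => !(PySem.Set.contains keys y)) = [] := by
    rw [List.filter_eq_nil_iff]
    intro y hy
    have hmem : y ∈ keys := by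
      have h' := (PySem.Set.mem_ofList _ y).1 hy
      simp only [List.mem_flatMap] at h'
      tauto
    simpa using hmem
  rw [h0, List.append_nil]

-- snd-projection of a flatMap of singleton pairs (used for the trimmed column values)
theorem flatMap_pair_snd (k : String) (f : Nat → String) (I : List Nat) :
    List.map (fun x => x.2) (I.flatMap (fun n => [(k, f n)])) = I.map f := by
  induction I with
  | nil => rfl
  | cons a t ih => simp only [List.flatMap_cons, List.map_cons, ih, List.singleton_append]

-- A's interleaved row loop equals the normal form
theorem a_eq_canon (N : Nat) (p : Nat → Bool) (idv : Nat → String) (colv : String → Nat → String)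
    (keys : List String)
    (hnd : (List.range N).filter p ≠ [] → keys.Nodup) :
    (((List.range N).foldl
        (fun (st : PySem.Dict String (List String) × List String) n =>
          if p n then
            (keys.foldl (fun t key => t.modify key [] (· ++ [colv key n])) st.1,
             st.2 ++ [idv n])
          else st)
        (PySem.Dict.empty, [])).1.items,
     ((List.range N).foldl
        (fun (st : PySem.Dict String (List String) × List String) n =>
          if p n then
            (keys.foldl (fun t key => t.modify key [] (· ++ [colv key n])) st.1,
             st.2 ++ [idv n])
          else st)
        (PySem.Dict.empty, [])).2)
    = pvCanon N p idv colv keys := by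
  unfold pvCanon
  have hstep : (fun (st : PySem.Dict String (List String) × List String) n =>
        if p n then
          (keys.foldl (fun t key => t.modify key [] (· ++ [colv key n])) st.1,
           st.2 ++ [idv n])
        else st)
      = fun st n =>
          ((fun a n => if p n then keys.foldl (fun t key => t.modify key [] (· ++ [colv key n])) a else a) st.1 n,
           (fun b n => if p n then b ++ [idv n] else b) st.2 n) := by
    funext st n; by_cases h : p n <;> simp [h]
  rw [hstep,
      PySem.List.foldl_prod_mk
        (f := fun (a : PySem.Dict String (List String)) (n : Nat) =>
          if p n then keys.foldl (fun (t : PySem.Dict String (List String)) (key : String) =>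
            t.modify key [] (· ++ [colv key n])) a else a)
        (g := fun (b : List String) (n : Nat) => if p n then b ++ [idv n] else b),
      PySem.List.foldl_append_if,
      foldl_if_skip p (fun (a : PySem.Dict String (List String)) (n : Nat) =>
        keys.foldl (fun (t : PySem.Dict String (List String)) (key : String) =>
          t.modify key [] (· ++ [colv key n])) a)]
  dsimp only
  rw [List.nil_append]
  set I := (List.range N).filter p with hIdef
  by_cases hI : I = []
  · rw [hI]; rfl
  · have hk := hnd hI
    have h2 : (fun (t : PySem.Dict String (List String)) n =>
          keys.foldl (fun t key => t.modify key [] (· ++ [colv key n])) t)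
        = fun t n => ((keys.map fun key => (key, colv key n)).foldl
            (fun t q => t.modify q.1 [] (· ++ [q.2])) t) := by
      funext t n; rw [List.foldl_map]
    rw [h2, foldl_foldl_eq_foldl_flatMap]
    set L := I.flatMap (fun n => keys.map fun key => (key, colv key n)) with hLdef
    have hLfst : L.map Prod.fst = I.flatMap (fun _ => keys) := by
      simp [hLdef, List.map_flatMap, List.map_map, Function.comp_def]
    have hkeysD : (L.foldl (fun t q => t.modify q.1 [] (· ++ [q.2])) PySem.Dict.empty).keys = keys := by
      have h := PySem.Dict.keys_foldl_modify_key L Prod.fst ([] : List String)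
        (fun _ q => (· ++ [q.2])) PySem.Dict.empty
      rw [PySem.Dict.keys_empty, PySem.Set.update_nil_left, hLfst,
          ofList_flatMap_const hk hI] at h
      exact h
    have hndD : (L.foldl (fun t q => t.modify q.1 [] (· ++ [q.2])) PySem.Dict.empty).keys.Nodup := by
      rw [hkeysD]; exact hk
    have hitems := PySem.Dict.items_eq_map_keys
      (L.foldl (fun t q => t.modify q.1 [] (· ++ [q.2])) PySem.Dict.empty) hndD ([] : List String)
    rw [hkeysD] at hitems
    rw [hitems]
    have hB := PySem.Dict.items_foldl_insert_fresh keys (fun a => a)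
      (fun key => I.map (colv key)) PySem.Dict.empty
      (by intro a _; exact PySem.Dict.contains_empty a)
      (by simpa using hk)
    rw [if_neg (show ¬(I.isEmpty = true) by simp [List.isEmpty_iff, hI]), hB]
    refine congrArg (fun x => (x, I.map idv)) ?_
    rw [show (PySem.Dict.empty : PySem.Dict String (List String)).items = [] from rfl,
        List.nil_append]
    apply List.map_congr_left
    intro k hkmem
    dsimp only
    refine congrArg (Prod.mk k) ?_
    rw [PySem.Dict.getD_foldl_modify_append]
    rw [show (PySem.Dict.empty : PySem.Dict String (List String)).getD k [] = [] from rfl,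
        List.nil_append]
    rw [hLdef, List.filter_flatMap]
    have hone : ∀ n : Nat, List.filter (fun p => p.1 == k)
        (List.map (fun key => (key, colv key n)) keys) = [(k, colv k n)] := by
      intro n
      rw [List.filter_map]
      have h2' : List.filter ((fun (p : String × String) => p.1 == k) ∘ (fun key => (key, colv key n))) keys = [k] := by
        have e : ((fun (p : String × String) => p.1 == k) ∘ fun key => (key, colv key n))
            = (fun x => x == k) := rfl
        rw [e, List.filter_beq, List.count_eq_one_of_mem hk hkmem, List.replicate_one]
      rw [h2']
      rfl
    rw [show (fun a => List.filter (fun p => p.1 == k)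
          (List.map (fun key => (key, colv key a)) keys)) = (fun n => [(k, colv k n)])
        from funext hone]
    exact flatMap_pair_snd k (colv k) I

-- B's gather-and-transpose equals the normal form
theorem b_eq_canon (N : Nat) (p : Nat → Bool) (idv : Nat → String) (colv : String → Nat → String)
    (keys : List String) :
    (let k := keys.length
     let matched : List (List String) :=
       ((List.range N).filter p).map (fun n => keys.map (fun key => colv key n) ++ [idv n])
     if matched.isEmpty then ((PySem.Dict.empty : PySem.Dict String (List String)).items, ([] : List String))
     else
       let cols : List (List String) := (List.range (k+1)).map (fun i => matched.map (fun row => row.getD i ""))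
       let trim := (keys.zip cols).foldl
         (fun (t : PySem.Dict String (List String)) q => t.insert q.1 q.2) PySem.Dict.empty
       (trim.items, cols.getD k []))
    = pvCanon N p idv colv keys := by
  unfold pvCanon
  set I := (List.range N).filter p with hIdef
  set k := keys.length with hk
  dsimp only
  by_cases hI : I = []
  · simp [hI]
  · have hne : (I.map (fun n => keys.map (fun key => colv key n) ++ [idv n])).isEmpty = false := by
      simp [hI]
    rw [hne]
    simp only [Bool.false_eq_true, if_false]
    rw [if_neg (show ¬(I.isEmpty = true) by simp [List.isEmpty_iff, hI])]
    have hcols : ∀ i < k + 1,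
        ((List.range (k+1)).map (fun i =>
          (I.map (fun n => keys.map (fun key => colv key n) ++ [idv n])).map
            (fun row => row.getD i ""))).getD i []
        = I.map (fun n => (keys.map (fun key => colv key n) ++ [idv n]).getD i "") := by
      intro i hi
      rw [List.getD_eq_getElem _ _ (by simpa using hi), List.getElem_map,
          List.getElem_range, List.map_map]
      rfl
    refine Prod.ext ?_ ?_
    · -- trim part
      refine congrArg PySem.Dict.items ?_
      have hzip : keys.zip ((List.range (k+1)).map (fun i =>
            (I.map (fun n => keys.map (fun key => colv key n) ++ [idv n])).map
              (fun row => row.getD i "")))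
          = keys.map (fun key => (key, I.map (colv key))) := by
        apply List.ext_getElem
        · simp [hk]
        · intro i h1 h2
          simp only [List.getElem_zip, List.getElem_map, List.getElem_range, List.map_map]
          have hik : i < k := by simpa [hk] using h2
          refine Prod.ext rfl ?_
          apply List.map_congr_left
          intro n _
          show (keys.map (fun key => colv key n) ++ [idv n]).getD i "" = colv keys[i] n
          rw [List.getD_eq_getElem _ _ (by simp; omega),
              List.getElem_append_left (by simpa using hik), List.getElem_map]
      rw [hzip, List.foldl_map]
    · -- collision id part
      have := hcols k (Nat.lt_succ_self k)
      rw [this]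
      apply List.map_congr_left
      intro n _
      show (keys.map (fun key => colv key n) ++ [idv n]).getD k "" = idv n
      rw [List.getD_eq_getElem _ _ (by simp [hk]),
          List.getElem_append_right (by simp [hk])]
      simp [hk]

-- ===== VERDICT (by name: the statement is the Claim_ definition above) =====
theorem get_crashes_spec : Claim_equal_get_crashes := by
  intro crashes crash_keys city_name _hdom hpre
  unfold Spec_get_crashes
  obtain ⟨_, _, h3⟩ := hpre
  simp only [get_crashes, get_crashes_alt]
  rw [b_eq_canon ((PySem.Dict.mk crashes).getD "Collision Id" []).length
      (fun n => ((PySem.Dict.mk crashes).getD "City Name" []).getD n "" == city_name)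
      (fun n => ((PySem.Dict.mk crashes).getD "Collision Id" []).getD n "")
      (fun key n => ((PySem.Dict.mk crashes).getD key []).getD n "") crash_keys]
  exact a_eq_canon ((PySem.Dict.mk crashes).getD "Collision Id" []).length
    (fun n => ((PySem.Dict.mk crashes).getD "City Name" []).getD n "" == city_name)
    (fun n => ((PySem.Dict.mk crashes).getD "Collision Id" []).getD n "")
    (fun key n => ((PySem.Dict.mk crashes).getD key []).getD n "")
    crash_keys
    (by
      intro hne
      obtain ⟨n, hn⟩ := List.exists_mem_of_ne_nil _ hne
      have hn' := List.mem_filter.1 hn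
      have hlt := List.mem_range.1 hn'.1
      have heq : ((PySem.Dict.mk crashes).getD "City Name" []).getD n "" = city_name :=
        by simpa using hn'.2
      exact (h3 n hlt heq).1)
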